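-- pv_equiv track=rewrite | github.com/bluelightning32/vs-protocol | convert.py | translate_type
-- ===== SOURCE A (Python) =====
-- def translate_type(field_type):
--     if field_type == "byte[]":
--         return "bytes"
--
--     if field_type.endswith("[]"):
--         return 'repeated ' + translate_type(field_type[:-2])
--
--     if field_type == "uint":
--         return "uint32"
--     if field_type == "ulong":
--         return "uint64"
--     if field_type == "int":
--         return "int32"
--     if field_type == "long":
--         return "int64"
--     return field_type
-- ===== SOURCE B (Python) =====
-- def translate_type(field_type):
--     prefix = ''
--     t = field_type
--     while t.endswith('[]') and t != 'byte[]':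
--         prefix += 'repeated '
--         t = t[:-2]
--     if t == 'byte[]':
--         return prefix + 'bytes'
--     base = {'uint': 'uint32', 'ulong': 'uint64', 'int': 'int32', 'long': 'int64'}.get(t, t)
--     return prefix + base
-- ===== Notes on version B (the rewrite author's own statement) =====
-- stated objective: simpler
-- what changed: Replaced A's tail recursion (which rebuilds the string by concatenation on the way back up) with an explicit while loop that accumulates the repetition prefix and then resolves the base name through a single dict lookup instead of an if-chain.
import Mathlib
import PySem

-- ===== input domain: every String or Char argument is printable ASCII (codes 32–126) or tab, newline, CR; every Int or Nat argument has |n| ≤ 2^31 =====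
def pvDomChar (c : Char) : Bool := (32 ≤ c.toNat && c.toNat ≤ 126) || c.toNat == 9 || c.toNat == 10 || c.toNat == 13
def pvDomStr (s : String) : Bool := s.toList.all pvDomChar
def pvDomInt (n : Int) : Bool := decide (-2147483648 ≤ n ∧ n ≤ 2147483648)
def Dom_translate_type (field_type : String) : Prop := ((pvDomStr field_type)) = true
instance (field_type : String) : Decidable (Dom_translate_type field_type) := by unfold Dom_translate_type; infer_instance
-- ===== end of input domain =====

-- B replaces A's tail recursion with an explicit accumulator loop plus a dict lookup for the base name (objective: simpler).


-- ===== PORT A =====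
-- recursion on the character list; field_type[:-2] = dropping the trailing "[]" = dropLast.dropLast
def translateA (s : List Char) : List Char :=
  if s = "byte[]".toList then "bytes".toList
  else if _h : "[]".toList <:+ s then
    "repeated ".toList ++ translateA (s.dropLast.dropLast)
  else if s = "uint".toList then "uint32".toList
  else if s = "ulong".toList then "uint64".toList
  else if s = "int".toList then "int32".toList
  else if s = "long".toList then "int64".toList
  else s
termination_by s.length
decreasing_by
  have := _h.length_le
  simp at this ⊢
  omega

def translate_type (field_type : String) : String :=
  String.ofList (translateA field_type.toList)

-- ===== PORT B =====
def pvBaseDict : PySem.Dict String String :=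
  PySem.Dict.ofList [("uint", "uint32"), ("ulong", "uint64"), ("int", "int32"), ("long", "int64")]

-- while loop with accumulator prefix
def loopB (pre : List Char) (t : List Char) : List Char :=
  if h : "[]".toList <:+ t ∧ t ≠ "byte[]".toList then
    loopB (pre ++ "repeated ".toList) (t.dropLast.dropLast)
  else if t = "byte[]".toList then pre ++ "bytes".toList
  else pre ++ (pvBaseDict.getD (String.ofList t) (String.ofList t)).toList
termination_by t.length
decreasing_by
  have := h.1.length_le
  simp at this ⊢
  omega

def translate_type_alt (field_type : String) : String :=
  String.ofList (loopB [] field_type.toList)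

-- ===== PRECONDITION & SPEC =====
def Spec_translate_type (field_type : String) (out : String) : Prop := out = translate_type_alt field_type
instance (field_type : String) (out : String) : Decidable (Spec_translate_type field_type out) := by unfold Spec_translate_type; infer_instance

-- ===== CLAIM (what is proved, stated in full; the proofs are below) =====
def Claim_equal_translate_type : Prop := ∀ (field_type : String), Dom_translate_type field_type → Spec_translate_type field_type (translate_type field_type)

-- ===== LEMMAS AND PROOFS =====
theorem toList_mk_eq_iff (t : List Char) (u : String) :
    (String.ofList t = u) ↔ t = u.toList := by
  constructor
  · intro h; rw [← h]; simp
  · intro h; subst h; simp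

theorem base_lookup (t : List Char) :
    (pvBaseDict.getD (String.ofList t) (String.ofList t)).toList =
      if t = "uint".toList then "uint32".toList
      else if t = "ulong".toList then "uint64".toList
      else if t = "int".toList then "int32".toList
      else if t = "long".toList then "int64".toList
      else t := by
  have h : pvBaseDict =
      (((PySem.Dict.empty.insert "uint" "uint32").insert "ulong" "uint64").insert
        "int" "int32").insert "long" "int64" := by decide
  rw [h]
  simp only [PySem.Dict.getD_insert, PySem.Dict.getD_empty, toList_mk_eq_iff t]
  split_ifs <;> simp_all

theorem loopB_eq (pre t : List Char) : loopB pre t = pre ++ translateA t := by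
  induction pre, t using loopB.induct with
  | case1 pre t h ih =>
    rw [loopB, translateA]
    simp only [dif_pos h, if_neg h.2, dif_pos h.1, ih, List.append_assoc]
  | case2 pre _ =>
    rw [loopB, translateA]
    simp
  | case3 pre t h1 h2 =>
    have hs : ¬ ("[]".toList <:+ t) := fun hsuf => h1 ⟨hsuf, h2⟩
    rw [loopB, translateA]
    simp only [dif_neg h1, if_neg h2, dif_neg hs, base_lookup]

-- ===== VERDICT (by name: the statement is the Claim_ definition above) =====
theorem translate_type_spec : Claim_equal_translate_type := by
  intro field_type _
  unfold Spec_translate_type translate_type translate_type_alt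
  rw [loopB_eq]
  simp
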